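-- pv_equiv track=rewrite | github.com/Hqko01/Python | SquaringDelete_EVAL.py | remove_squares
-- ===== SOURCE A (Python) =====
-- def remove_squares(x):
--     removed = list()
--     temp = list()
--     for i in x:
--         if i**2 in x:
--             removed.append(i)
--             removed.append(i**2)
--     for i in x:
--         if i not in removed:
--             temp.append(i)
--     return temp
-- ===== SOURCE B (Python) =====
-- def _isqrt(n):
--     # binary search for the largest r with r*r <= n  (n >= 0)
--     lo, hi = 0, n + 1
--     while hi - lo > 1:
--         mid = (lo + hi) // 2
--         if mid * mid <= n:
--             lo = mid
--         else:
--             hi = mid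
--     return lo
--
--
-- def remove_squares(x):
--     present = set(x)
--     out = []
--     for v in x:
--         if v * v in present:
--             continue            # v is a root whose square is present
--         if v >= 0:
--             r = _isqrt(v)
--             if r * r == v and (r in present or -r in present):
--                 continue        # v is the square of a present root
--         out.append(v)
--     return out
-- ===== Notes on version B (the rewrite author's own statement) =====
-- stated objective: faster
-- what changed: Instead of building a removal list and re-scanning it (or any squares table), B decides 'v is the square of a present element' arithmetically: it computes the integer square root of v by a hand-written binary search and membership-tests only the two candidate roots, in one pass over x.
import Mathlib
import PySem

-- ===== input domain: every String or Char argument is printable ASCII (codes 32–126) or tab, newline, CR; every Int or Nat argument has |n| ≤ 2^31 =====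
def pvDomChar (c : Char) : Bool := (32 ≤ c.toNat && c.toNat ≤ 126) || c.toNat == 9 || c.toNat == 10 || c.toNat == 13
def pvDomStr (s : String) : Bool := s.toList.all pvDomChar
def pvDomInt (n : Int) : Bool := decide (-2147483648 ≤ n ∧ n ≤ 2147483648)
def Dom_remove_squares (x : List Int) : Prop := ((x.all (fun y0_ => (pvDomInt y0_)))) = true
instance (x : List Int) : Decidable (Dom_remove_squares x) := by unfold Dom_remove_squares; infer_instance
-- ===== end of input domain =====

-- B drops A's removal-list-then-filter structure: one pass that tests each element's
-- square for presence and uses a binary-search integer square root to test whether the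
-- element is the square of a present root (faster: no quadratic membership scans).


-- ===== PORT A =====
-- first loop of A: removed = []; for i in x: if i**2 in x: removed += [i, i**2]
def removedListA (x : List Int) : List Int :=
  x.foldl (fun removed i => if i ^ 2 ∈ x then removed ++ [i, i ^ 2] else removed) []

-- second loop of A: temp = []; for i in x: if i not in removed: temp.append(i)
def remove_squares (x : List Int) : List Int :=
  x.foldl (fun temp i => if i ∈ removedListA x then temp else temp ++ [i]) []

-- ===== PORT B =====
-- termination helper for the binary-search loop (cited in decreasing_by)
theorem pvMidBounds (lo hi : Int) (h : hi - lo > 1) :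
    lo < PySem.Int.floordiv (lo + hi) 2 ∧ PySem.Int.floordiv (lo + hi) 2 < hi := by
  rw [PySem.Int.floordiv_eq_ediv_of_pos (by norm_num)]
  omega

-- Source B's _isqrt: lo, hi = 0, n+1; while hi - lo > 1: mid = (lo+hi)//2; …
def isqrtLoop (n lo hi : Int) : Int :=
  if h : hi - lo > 1 then
    let mid := PySem.Int.floordiv (lo + hi) 2
    if mid * mid ≤ n then isqrtLoop n mid hi else isqrtLoop n lo mid
  else lo
termination_by (hi - lo).toNat
decreasing_by
  · have := pvMidBounds lo hi h; omega
  · have := pvMidBounds lo hi h; omega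

def pyIsqrt (n : Int) : Int := isqrtLoop n 0 (n + 1)

-- Source B's remove_squares: single loop, appending v unless one of the two tests removes it
def remove_squares_alt (x : List Int) : List Int :=
  let present := PySem.Set.ofList x
  x.foldl (fun out v =>
    if present.contains (v * v) then out
    else if 0 ≤ v then
      let r := pyIsqrt v
      if r * r == v && (present.contains r || present.contains (-r)) then out
      else out ++ [v]
    else out ++ [v]) []

-- ===== PRECONDITION & SPEC =====
def Spec_remove_squares (x : List Int) (out : List Int) : Prop := out = remove_squares_alt x
instance (x : List Int) (out : List Int) : Decidable (Spec_remove_squares x out) := by unfold Spec_remove_squares; infer_instance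

-- ===== CLAIM (what is proved, stated in full; the proofs are below) =====
def Claim_equal_remove_squares : Prop := ∀ (x : List Int), Dom_remove_squares x → Spec_remove_squares x (remove_squares x)

-- ===== LEMMAS AND PROOFS =====

-- membership in A's accumulated removal list
theorem mem_removedFold (x l : List Int) (acc : List Int) (v : Int) :
    v ∈ l.foldl (fun removed i => if i ^ 2 ∈ x then removed ++ [i, i ^ 2] else removed) acc ↔
      v ∈ acc ∨ ∃ i ∈ l, i ^ 2 ∈ x ∧ (v = i ∨ v = i ^ 2) := by
  induction l generalizing acc with
  | nil => simp
  | cons a l ih =>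
    simp only [List.foldl_cons, ih]
    by_cases h : a ^ 2 ∈ x
    · simp only [if_pos h]; aesop
    · simp only [if_neg h]; aesop

theorem mem_removedListA (x : List Int) (v : Int) :
    v ∈ removedListA x ↔ ∃ i ∈ x, i ^ 2 ∈ x ∧ (v = i ∨ v = i ^ 2) := by
  simp [removedListA, mem_removedFold]

-- invariant of the binary-search loop: it returns the floor square root
theorem isqrtLoop_spec (n : Int) : ∀ (fuel : Nat) (lo hi : Int), (hi - lo).toNat ≤ fuel →
    0 ≤ lo → lo < hi → lo * lo ≤ n → n < hi * hi →
    0 ≤ isqrtLoop n lo hi ∧ isqrtLoop n lo hi * isqrtLoop n lo hi ≤ n ∧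
      n < (isqrtLoop n lo hi + 1) * (isqrtLoop n lo hi + 1) := by
  intro fuel
  induction fuel with
  | zero => intro lo hi hf h0 hlt _ _; omega
  | succ f ih =>
    intro lo hi hf h0 hlt hlow hhigh
    rw [isqrtLoop]
    by_cases h : hi - lo > 1
    · have hmid := pvMidBounds lo hi h
      simp only [dif_pos h]
      by_cases hle : PySem.Int.floordiv (lo + hi) 2 * PySem.Int.floordiv (lo + hi) 2 ≤ n
      · simp only [if_pos hle]
        exact ih _ hi (by omega) (by omega) (by omega) hle hhigh
      · simp only [if_neg hle]
        exact ih lo _ (by omega) h0 (by omega) hlow (by omega)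
    · simp only [dif_neg h]
      have : hi = lo + 1 := by omega
      subst this
      exact ⟨h0, hlow, hhigh⟩

theorem pyIsqrt_spec (n : Int) (hn : 0 ≤ n) :
    0 ≤ pyIsqrt n ∧ pyIsqrt n * pyIsqrt n ≤ n ∧ n < (pyIsqrt n + 1) * (pyIsqrt n + 1) := by
  unfold pyIsqrt
  exact isqrtLoop_spec n (n + 1).toNat 0 (n + 1) (by omega) le_rfl (by omega)
    (by omega) (by nlinarith)

-- the floor square root pins down the only possible nonnegative root
theorem sqrt_unique (a r v : Int) (ha : 0 ≤ a) (hr : 0 ≤ r) (hav : a * a = v)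
    (h1 : r * r ≤ v) (h2 : v < (r + 1) * (r + 1)) : a = r := by
  rcases lt_trichotomy a r with hlt | heq | hgt
  · have := mul_self_lt_mul_self ha hlt; omega
  · exact heq
  · have : (r + 1) * (r + 1) ≤ a * a := mul_self_le_mul_self (by omega) (by omega)
    omega

-- B's square test agrees with "v is the square of some element of x"
theorem square_test_iff (x : List Int) (v : Int) :
    (0 ≤ v ∧ pyIsqrt v * pyIsqrt v = v ∧ (pyIsqrt v ∈ x ∨ -pyIsqrt v ∈ x)) ↔
      ∃ i ∈ x, i ^ 2 = v := by
  constructor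
  · rintro ⟨_, hrv, hr | hr⟩
    · exact ⟨pyIsqrt v, hr, by rw [pow_two]; exact hrv⟩
    · exact ⟨-pyIsqrt v, hr, by rw [neg_sq, pow_two]; exact hrv⟩
  · rintro ⟨i, hi, rfl⟩
    have hv : (0:Int) ≤ i ^ 2 := sq_nonneg i
    obtain ⟨hr0, hr1, hr2⟩ := pyIsqrt_spec _ hv
    by_cases hpos : 0 ≤ i
    · have : i = pyIsqrt (i ^ 2) := sqrt_unique i _ _ hpos hr0 (by ring) hr1 hr2
      exact ⟨hv, by rw [← this]; ring, Or.inl (this ▸ hi)⟩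
    · have : -i = pyIsqrt (i ^ 2) := sqrt_unique (-i) _ _ (by omega) hr0 (by ring) hr1 hr2
      refine ⟨hv, by rw [← this]; ring, Or.inr ?_⟩
      rw [← this]; simpa using hi
  
-- B's fold is a filter by its keep-predicate
def keepB (x : List Int) (v : Int) : Bool :=
  !(PySem.Set.ofList x).contains (v * v) &&
    !(decide (0 ≤ v) && (pyIsqrt v * pyIsqrt v == v &&
      ((PySem.Set.ofList x).contains (pyIsqrt v) || (PySem.Set.ofList x).contains (-(pyIsqrt v)))))

theorem alt_eq_filter (x : List Int) : remove_squares_alt x = x.filter (keepB x) := by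
  unfold remove_squares_alt
  have hbody : (fun (out : List Int) (v : Int) =>
      if (PySem.Set.ofList x).contains (v * v) then out
      else if 0 ≤ v then
        let r := pyIsqrt v
        if r * r == v && ((PySem.Set.ofList x).contains r || (PySem.Set.ofList x).contains (-r)) then out
        else out ++ [v]
      else out ++ [v]) =
      (fun out v => if keepB x v then out ++ [v] else out) := by
    funext out v
    simp only [keepB]
    by_cases h1 : (PySem.Set.ofList x).contains (v * v) <;>
      by_cases h2 : 0 ≤ v <;>
        simp [h2] <;> split_ifs <;> simp_all
  simp only [hbody]
  rw [PySem.List.foldl_append_if_eq_filter]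
  simp

-- ===== VERDICT (by name: the statement is the Claim_ definition above) =====
theorem remove_squares_spec : Claim_equal_remove_squares := by
  intro x _
  unfold Spec_remove_squares remove_squares
  rw [alt_eq_filter]
  have h := PySem.List.foldl_append_if (fun i => !decide (i ∈ removedListA x)) (fun i : Int => i) x []
  simp only [Bool.not_eq_eq_eq_not, Bool.not_true, decide_eq_false_iff_not, ite_not] at h
  rw [h]
  simp only [List.map_id', List.nil_append]
  apply List.filter_congr
  intro v hv
  have hiff : (v ∈ removedListA x) ↔ (v * v ∈ x ∨ (0 ≤ v ∧ pyIsqrt v * pyIsqrt v = v ∧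
      (pyIsqrt v ∈ x ∨ -pyIsqrt v ∈ x))) := by
    rw [mem_removedListA, square_test_iff]
    constructor
    · rintro ⟨i, hi, hisq, (rfl | rfl)⟩
      · rw [pow_two] at hisq; exact Or.inl hisq
      · exact Or.inr ⟨i, hi, rfl⟩
    · rintro (hsq | ⟨i, hi, rfl⟩)
      · exact ⟨v, hv, by rw [pow_two]; exact hsq, Or.inl rfl⟩
      · exact ⟨i, hi, hv, Or.inr rfl⟩
  simp only [keepB, Bool.not_eq_eq_eq_not]
  rw [Bool.eq_iff_iff]
  simp [hiff, PySem.Set.mem_ofList]
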